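/- GENERATED by mk_final_copies.py from the proof of the farm's unit `imdct_step3_inner_s_loop_ld654.2` (farm:imdct_step3_inner_s_loop_ld654.2.1: Proof.lean) as the
   re-elaboration sweep compiled it — do not edit. -/
import Asan.CheckWalk
import Vorbis.Spec.Units.imdct_step3_inner_s_loop_ld654_2
import Vorbis.Spec.Worked.imdct_step3_inner_s_loop_ld654_2_Lemmas
open X86 X86.User Asan Vorbis Vorbis.Spec

set_option maxRecDepth 4000
set_option maxHeartbeats 4000000

namespace Vorbis.Spec.imdct_step3_inner_s_loop_ld654_2

/-- **The body of the loop, whole**: from the assertion `AtBody` at `cut1` (0x1069af, iteration `t < n'`) to the assertion `AtHead`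
at the loop head `loop1` (0x106c47) with `t + 1`, by chaining the three parts of Lemmas.lean at their cut points `chk10`
(0x106aeb, where `rdi = z - 16` bytes) and `cut2` (0x106c3b, the return of `iter_54(z)`). -/
theorem body_whole {Lay : Layout} (hLay : Lay.hi = 0x1000000) {μ : Microarch} (hμ : UserX.MicroOK μ) {u₀ : State}
    (hcode : HasCodeNat Lay u₀ Vorbis.L.imdct_step3_inner_s_loop_ld654.entry Vorbis.Code.code_imdct_step3_inner_s_loop_ld654.nat Vorbis.L.imdct_step3_inner_s_loop_ld654.size)
    (hload4 : Asan.SmallCheck Lay μ Vorbis.WayInv (Vorbis.CodeOK u₀) [.rax, .rcx, .rdx] 4 Vorbis.L.__asan_load4_noabort.entry)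
    {others : List Obj} {frames : List (Nat × FrameLayout)}
    (hiter' : Calls Lay μ Vorbis.WayInv (Vorbis.conv u₀) Vorbis.L.iter_54.entry (Vorbis.Spec.iter_54.spec others frames))
    {len i0 : Nat} {ue : State} {ret : Word} {t : Nat} {v : State}
    (hv : imdct_step3_inner_s_loop_ld654.AtBody u₀ others frames len i0 ue ret t v) :
    ReachVia Lay μ WayInv v (fun w => imdct_step3_inner_s_loop_ld654.AtHead u₀ others frames len i0 ue ret (t + 1) w) := by
  -- 0x1069af … 0x106aeb
  refine ReachVia.trans (partA hLay hμ hcode hload4 hv) ?_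
  intro w hw
  -- 0x106aeb … 0x106c3b
  refine ReachVia.trans (partB hLay hμ hcode hload4 hiter' hw.1 hw.2) ?_
  intro w' hw'
  -- 0x106c3b … 0x106c47
  exact partC hLay hμ hcode hiter' hw'

end Vorbis.Spec.imdct_step3_inner_s_loop_ld654_2

/-- Segment 2 of `imdct_step3_inner_s_loop_ld654` (`cut1` … `loop1`: the body of the loop `while (z > base)`, 138 instructions, 16
check sites, two calls of `iter_54`): from `AtBody` with `t` to `AtHead` with `t + 1`. -/
theorem Vorbis.Spec.Worked.imdct_step3_inner_s_loop_ld654_2_ok : Vorbis.Spec.imdct_step3_inner_s_loop_ld654_2.Statement := by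
  intro Lay hLay μ hμ u₀ hcode hload4 hiter others frames len i0 ue ret t v hv
  exact Vorbis.Spec.imdct_step3_inner_s_loop_ld654_2.body_whole hLay hμ hcode hload4 (hiter others frames) hv
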